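-- pv_equiv track=rewrite | github.com/SamuelOshin/codebegen_be | app/services/ai_orchestrator.py | _show_key_files
-- ===== SOURCE A (Python) =====
-- from typing import Dict, Any, Optional, List
--
-- def _show_key_files(files: Dict[str, str], max_files: int = 5) -> str:
--     """Show content of most relevant files to LLM"""
--     # Priority order for key files
--     priority_patterns = [
--         'main.py', 'app.py', '__init__.py',
--         'config', 'settings',
--         'models/', 'schemas/',
--         'routers/', 'api/',
--         'database', 'db.py'
--     ]
--
--     key_files = []
--     for pattern in priority_patterns:
--         for filepath, content in files.items():
--             if pattern in filepath.lower() and filepath not in key_files: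
--                 key_files.append(filepath)
--                 if len(key_files) >= max_files:
--                     break
--         if len(key_files) >= max_files:
--             break
--
--     # Format as code blocks
--     result = []
--     for filepath in key_files[:max_files]:
--         content = files[filepath]
--         # Truncate long files
--         if len(content) > 500:
--             content = content[:500] + "\n... (truncated)"
--         result.append(f"=== {filepath} ===\n{content}\n")
--
--     return "\n".join(result)
-- ===== SOURCE B (Python) =====
-- def _show_key_files(files, max_files=5):
--     """Show content of most relevant files to LLM"""
--     priority_patterns = [
--         'main.py', 'app.py', '__init__.py',
--         'config', 'settings',
--         'models/', 'schemas/',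
--         'routers/', 'api/',
--         'database', 'db.py'
--     ]
--
--     if max_files <= 0:
--         return ""
--
--     # One pass over the files: drop each file into the bucket of the first
--     # pattern it matches, then read the buckets off in priority order.
--     buckets = [[] for _ in priority_patterns]
--     for filepath in files:
--         low = filepath.lower()
--         for i, pattern in enumerate(priority_patterns):
--             if pattern in low:
--                 buckets[i].append(filepath)
--                 break
--
--     selected = [fp for bucket in buckets for fp in bucket][:max_files]
--
--     blocks = []
--     for filepath in selected:
--         content = files[filepath]
--         if len(content) > 500:
--             content = content[:500] + "\n... (truncated)"
--         blocks.append(f"=== {filepath} ===\n{content}\n")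
--     return "\n".join(blocks)
-- ===== Notes on version B (the rewrite author's own statement) =====
-- stated objective: alternative
-- what changed: The selection phase is inverted: instead of A's pattern-major nested loops that rescan all files once per pattern with a 'not in key_files' dedup test and early breaks, B makes a single file-major pass that drops each file into the bucket of its first matching pattern and then reads the buckets off in priority order, truncating with one slice; the formatting pass is unchanged.
import Mathlib
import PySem

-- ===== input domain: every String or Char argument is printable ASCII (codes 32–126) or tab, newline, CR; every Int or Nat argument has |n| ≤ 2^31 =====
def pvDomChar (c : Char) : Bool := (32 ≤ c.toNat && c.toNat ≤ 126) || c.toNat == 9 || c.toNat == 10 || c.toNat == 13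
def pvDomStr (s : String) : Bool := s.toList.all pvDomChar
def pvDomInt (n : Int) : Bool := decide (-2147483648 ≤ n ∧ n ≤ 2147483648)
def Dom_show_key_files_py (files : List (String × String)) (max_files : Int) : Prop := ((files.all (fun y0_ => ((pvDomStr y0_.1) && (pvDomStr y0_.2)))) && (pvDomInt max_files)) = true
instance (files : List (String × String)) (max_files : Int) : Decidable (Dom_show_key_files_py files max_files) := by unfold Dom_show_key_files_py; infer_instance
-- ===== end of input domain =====

-- B replaces A's pattern-major repeated scans over the files (with dedup membership
-- tests and early break) by a single file-major pass that buckets each file under its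
-- first matching pattern (objective: alternative decomposition, same result).


-- ===== PORT A =====
def pvPatternsA : List String :=
  ["main.py", "app.py", "__init__.py",
   "config", "settings",
   "models/", "schemas/",
   "routers/", "api/",
   "database", "db.py"]

-- 'pattern in filepath.lower()'
def pvMatchA (pat fp : String) : Bool := PySem.Str.isIn pat (PySem.Str.lower fp)

-- inner 'for filepath, content in files.items():' with its break (break = return)
def pvInnerA (pat : String) (mf : Int) : List (String × String) → List String → List String
  | [], kf => kf
  | (fp, _) :: rest, kf =>
    if pvMatchA pat fp = true ∧ fp ∉ kf then
      if mf ≤ PySem.List.len (kf ++ [fp]) then kf ++ [fp]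
      else pvInnerA pat mf rest (kf ++ [fp])
    else pvInnerA pat mf rest kf

-- outer 'for pattern in priority_patterns:' with its break after the len check
def pvOuterA (mf : Int) (items : List (String × String)) : List String → List String → List String
  | [], kf => kf
  | pat :: pats, kf =>
    let kf' := pvInnerA pat mf items kf
    if mf ≤ PySem.List.len kf' then kf' else pvOuterA mf items pats kf'

-- one iteration of the formatting loop (content lookup, truncation, f-string)
def pvBlockA (d : PySem.Dict String String) (fp : String) : String :=
  let content := (d.getD fp "").toList
  let content := if 500 < content.length then content.take 500 ++ "\n... (truncated)".toList else content
  String.ofList ("=== ".toList ++ fp.toList ++ " ===\n".toList ++ content ++ "\n".toList)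

def show_key_files_py (files : List (String × String)) (max_files : Int) : String :=
  let d := PySem.Dict.ofList files
  let key_files := pvOuterA max_files d.items pvPatternsA []
  let sel := PySem.List.slice key_files none (some max_files)
  PySem.Str.join "\n" (sel.foldl (fun acc fp => acc ++ [pvBlockA d fp]) [])

-- ===== PORT B =====
def pvPatternsB : List String :=
  ["main.py", "app.py", "__init__.py",
   "config", "settings",
   "models/", "schemas/",
   "routers/", "api/",
   "database", "db.py"]

-- inner 'for i, pattern in enumerate(priority_patterns):' with its break
def pvGoB (fp low : String) : List (Int × String) → List (List String) → List (List String)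
  | [], buckets => buckets
  | (i, pat) :: rest, buckets =>
    if PySem.Str.isIn pat low then
      PySem.List.pySetD buckets i (PySem.List.pyGetD buckets i [] ++ [fp])
    else pvGoB fp low rest buckets

def pvBlockB (d : PySem.Dict String String) (fp : String) : String :=
  let content := (d.getD fp "").toList
  let content := if 500 < content.length then content.take 500 ++ "\n... (truncated)".toList else content
  String.ofList ("=== ".toList ++ fp.toList ++ " ===\n".toList ++ content ++ "\n".toList)

def show_key_files_py_alt (files : List (String × String)) (max_files : Int) : String :=
  let d := PySem.Dict.ofList files
  if max_files ≤ 0 then "" else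
  let buckets := d.keys.foldl
    (fun buckets fp => pvGoB fp (PySem.Str.lower fp) (PySem.List.enumerate pvPatternsB) buckets)
    (List.replicate pvPatternsB.length [])
  let selected := PySem.List.slice buckets.flatten none (some max_files)
  PySem.Str.join "\n" (selected.foldl (fun acc fp => acc ++ [pvBlockB d fp]) [])

-- ===== PRECONDITION & SPEC =====
def Spec_show_key_files_py (files : List (String × String)) (max_files : Int) (out : String) : Prop := out = show_key_files_py_alt files max_files
instance (files : List (String × String)) (max_files : Int) (out : String) : Decidable (Spec_show_key_files_py files max_files out) := by unfold Spec_show_key_files_py; infer_instance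

-- ===== CLAIM (what is proved, stated in full; the proofs are below) =====
def Claim_equal_show_key_files_py : Prop := ∀ (files : List (String × String)) (max_files : Int), Dom_show_key_files_py files max_files → Spec_show_key_files_py files max_files (show_key_files_py files max_files)

-- ===== LEMMAS AND PROOFS =====

-- index of the first pattern (in ps, counting from i) matching fp
def pvFirstAux (fp : String) : List String → Nat → Option Nat
  | [], _ => none
  | pat :: ps, i => if pvMatchA pat fp then some i else pvFirstAux fp ps (i + 1)

-- the files of ks whose first matching pattern is number i, in ks order
def pvGroup (ks : List String) (i : Nat) : List String :=
  ks.filter (fun fp => pvFirstAux fp pvPatternsA 0 = some i)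

-- groups 0..n-1 concatenated
def pvG (ks : List String) (n : Nat) : List String := (List.range n).flatMap (pvGroup ks)

theorem pvFirstAux_shift (fp : String) : ∀ (ps : List String) (i : Nat),
    pvFirstAux fp ps i = (pvFirstAux fp ps 0).map (· + i) := by
  intro ps
  induction ps with
  | nil => intro i; simp [pvFirstAux]
  | cons pat ps ih =>
    intro i
    simp only [pvFirstAux]
    by_cases h : pvMatchA pat fp
    · simp [h]
    · have he : (fun x => x + (i + 1)) = (fun x : Nat => x + (1 + i)) := by funext x; omega
      simp [h, ih (i+1), ih 1, Option.map_map, he]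

theorem pvFirstAux_bound (fp : String) : ∀ (ps : List String) (i j : Nat),
    pvFirstAux fp ps i = some j → i ≤ j ∧ j < i + ps.length := by
  intro ps
  induction ps with
  | nil => intro i j h; simp [pvFirstAux] at h
  | cons pat ps ih =>
    intro i j h
    simp only [pvFirstAux] at h
    simp only [List.length_cons]
    by_cases hm : pvMatchA pat fp
    · simp [hm] at h; omega
    · simp [hm] at h; have := ih (i+1) j h; omega

theorem pvFirstAux_append (fp : String) : ∀ (pre post : List String),
    pvFirstAux fp (pre ++ post) 0
      = (pvFirstAux fp pre 0).or ((pvFirstAux fp post 0).map (· + pre.length)) := by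
  intro pre
  induction pre with
  | nil => intro post; simp [pvFirstAux]
  | cons pat pre ih =>
    intro post
    by_cases hm : pvMatchA pat fp
    · simp [pvFirstAux, hm]
    · simp only [List.cons_append, pvFirstAux, hm, if_false]
      rw [pvFirstAux_shift fp (pre ++ post) 1, ih post, pvFirstAux_shift fp pre 1]
      cases h : pvFirstAux fp pre 0 <;> cases h2 : pvFirstAux fp post 0 <;>
        simp [Option.map_map, Option.or] <;> omega

theorem pv_mem_pvG (ks : List String) (n : Nat) (fp : String) :
    fp ∈ pvG ks n ↔ fp ∈ ks ∧ ∃ j < n, pvFirstAux fp pvPatternsA 0 = some j := by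
  simp [pvG, pvGroup, List.mem_flatMap, List.mem_filter]
  aesop

theorem pvG_succ (ks : List String) (i : Nat) : pvG ks (i + 1) = pvG ks i ++ pvGroup ks i := by
  simp [pvG, List.range_succ]

theorem pvG_split (ks : List String) {m n : Nat} (h : m ≤ n) :
    ∃ suf, pvG ks n = pvG ks m ++ suf := by
  refine ⟨(List.range' m (n - m)).flatMap (pvGroup ks), ?_⟩
  rw [pvG, pvG, ← List.flatMap_append]
  congr 1
  rw [List.range_eq_range', List.range_eq_range']
  have h2 := @List.range'_append 0 m (n - m) 1
  simp only [Nat.one_mul, Nat.zero_add] at h2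
  rw [h2]
  congr 1; omega

theorem pv_inner_spec (pat : String) (mf : Int) (hmf : 1 ≤ mf) :
    ∀ (items : List (String × String)) (kf : List String),
    (items.map Prod.fst).Nodup → kf.length < mf.toNat →
    pvInnerA pat mf items kf
      = kf ++ ((items.map Prod.fst).filter
          (fun fp => decide (pvMatchA pat fp = true ∧ fp ∉ kf))).take (mf.toNat - kf.length) := by
  intro items
  induction items with
  | nil => intro kf _ _; simp [pvInnerA]
  | cons hd rest ih =>
    obtain ⟨fp, c⟩ := hd
    intro kf hnd hlen
    simp only [List.map_cons, List.nodup_cons] at hnd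
    obtain ⟨hfp, hndr⟩ := hnd
    simp only [pvInnerA, List.map_cons, List.filter_cons]
    by_cases h : pvMatchA pat fp = true ∧ fp ∉ kf
    · rw [if_pos h]
      have hc : decide (pvMatchA pat fp = true ∧ fp ∉ kf) = true := by simpa using h
      rw [hc, if_pos rfl]
      have hlen' : PySem.List.len (kf ++ [fp]) = (kf.length : Int) + 1 := by
        simp [PySem.List.len_eq]
      by_cases hstop : mf ≤ (kf.length : Int) + 1
      · rw [if_pos (by rw [hlen']; exact hstop)]
        have : mf.toNat - kf.length = 1 := by omega
        rw [this]
        simp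
      · rw [if_neg (by rw [hlen']; exact hstop)]
        rw [ih (kf ++ [fp]) hndr (by simp; omega)]
        have hcongr : (rest.map Prod.fst).filter
            (fun x => decide (pvMatchA pat x = true ∧ x ∉ kf ++ [fp]))
            = (rest.map Prod.fst).filter (fun x => decide (pvMatchA pat x = true ∧ x ∉ kf)) := by
          apply List.filter_congr
          intro x hx
          have hxne : x ≠ fp := by rintro rfl; exact hfp hx
          simp [hxne]
        rw [hcongr]
        have htake : mf.toNat - kf.length = (mf.toNat - (kf ++ [fp]).length) + 1 := by
          simp; omega
        rw [htake, List.take_succ_cons]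
        simp
    · rw [if_neg h]
      simp only [h, decide_false, if_false]
      exact ih kf hndr hlen

theorem pv_outer_spec (mf : Int) (hmf : 1 ≤ mf) (items : List (String × String))
    (hnd : (items.map Prod.fst).Nodup) :
    ∀ (post pre : List String) (kf : List String), pvPatternsA = pre ++ post →
    kf = pvG (items.map Prod.fst) pre.length → kf.length < mf.toNat →
    pvOuterA mf items post kf = (pvG (items.map Prod.fst) pvPatternsA.length).take mf.toNat := by
  intro post
  induction post with
  | nil =>
    intro pre kf hP hkf hlen
    have hpre : pre = pvPatternsA := by simpa using hP.symm
    subst hpre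
    rw [pvOuterA, hkf]
    exact (List.take_of_length_le (by rw [← hkf]; omega)).symm
  | cons pat post' ih =>
    intro pre kf hP hkf hlen
    set ks := items.map Prod.fst with hks
    have hin := pv_inner_spec pat mf hmf items kf hnd hlen
    set i := pre.length with hi
    have hF : ks.filter (fun fp => decide (pvMatchA pat fp = true ∧ fp ∉ kf)) = pvGroup ks i := by
      apply List.filter_congr
      intro fp hfp
      have hmem : fp ∈ kf ↔ ∃ j < i, pvFirstAux fp pvPatternsA 0 = some j := by
        rw [hkf, pv_mem_pvG]
        exact ⟨fun h => h.2, fun h => ⟨hfp, h⟩⟩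
      have happ := pvFirstAux_append fp pre (pat :: post')
      rw [← hP] at happ
      by_cases hpre : ∃ j, pvFirstAux fp pre 0 = some j
      · obtain ⟨j, hj⟩ := hpre
        have hjlt : j < i := by have := pvFirstAux_bound fp pre 0 j hj; omega
        have hfirst : pvFirstAux fp pvPatternsA 0 = some j := by rw [happ, hj]; rfl
        have hink : fp ∈ kf := hmem.mpr ⟨j, hjlt, hfirst⟩
        have : ¬ (pvFirstAux fp pvPatternsA 0 = some i) := by rw [hfirst]; simp; omega
        simp [hink, this]
      · push_neg at hpre
        have hnone : pvFirstAux fp pre 0 = none := by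
          cases h : pvFirstAux fp pre 0 with
          | none => rfl
          | some j => exact absurd h (hpre j)
        rw [hnone, Option.none_or] at happ
        by_cases hm : pvMatchA pat fp
        · have hfirst : pvFirstAux fp pvPatternsA 0 = some i := by
            rw [happ]; simp [pvFirstAux, hm]; omega
          have hnk : fp ∉ kf := by
            rw [hmem]; rintro ⟨j, hjlt, hj⟩; rw [hfirst] at hj; simp at hj; omega
          simp [hm, hnk, hfirst]
        · have : ¬ (pvFirstAux fp pvPatternsA 0 = some i) := by
            rw [happ]
            simp only [pvFirstAux, hm, if_false]
            cases h : pvFirstAux fp (post') 1 with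
            | none => simp
            | some t =>
              have := pvFirstAux_bound fp post' 1 t h
              simp; omega
          simp [hm, this]
    rw [hF] at hin
    set g := pvGroup ks i with hg
    set c := mf.toNat with hc
    simp only [pvOuterA]
    rw [hin]
    have hlentake : (kf ++ g.take (c - kf.length)).length = kf.length + min (c - kf.length) g.length := by
      simp
    by_cases hcase : c ≤ kf.length + g.length
    · have hlc : (kf ++ g.take (c - kf.length)).length = c := by rw [hlentake]; omega
      rw [if_pos (by rw [PySem.List.len_eq, hlc]; omega)]
      have h1 : kf ++ g.take (c - kf.length) = (kf ++ g).take c := by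
        rw [List.take_append]; congr 1; exact (List.take_of_length_le (le_of_lt hlen)).symm
      have h2 : kf ++ g = pvG ks (i + 1) := by rw [hkf, ← pvG_succ]
      have hle : i + 1 ≤ pvPatternsA.length := by rw [hP]; simp; omega
      obtain ⟨suf, hs⟩ := pvG_split ks hle
      have hlen2 : (pvG ks (i + 1)).length = kf.length + g.length := by
        rw [← h2]; simp
      rw [h1, h2, hs, List.take_append_of_le_length (by omega)]
    · have htakeall : g.take (c - kf.length) = g := List.take_of_length_le (by omega)
      rw [htakeall]
      have hlc : (kf ++ g).length = kf.length + g.length := by simp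
      rw [if_neg (by rw [PySem.List.len_eq, hlc]; omega)]
      apply ih (pre ++ [pat])
      · rw [hP]; simp
      · have hlp : (pre ++ [pat]).length = pre.length + 1 := by simp
        rw [hlp, pvG_succ, hkf]
      · rw [hlc]; omega

theorem pv_inner_nonpos (pat : String) (mf : Int) (hmf : mf ≤ 0) :
    ∀ (items : List (String × String)), (pvInnerA pat mf items []).length ≤ 1 := by
  intro items
  induction items with
  | nil => simp [pvInnerA]
  | cons hd rest ih =>
    obtain ⟨fp, c⟩ := hd
    simp only [pvInnerA]
    by_cases h : pvMatchA pat fp = true ∧ fp ∉ ([] : List String)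
    · rw [if_pos h, if_pos (by simp [PySem.List.len_eq]; omega)]
      simp
    · rw [if_neg h]; exact ih

theorem pv_slice_nonpos {xs : List String} {mf : Int} (hmf : mf ≤ 0) (hlen : xs.length ≤ 1) :
    PySem.List.slice xs none (some mf) = [] := by
  rcases eq_or_lt_of_le hmf with h0 | hneg
  · rw [h0, PySem.List.slice_to xs le_rfl]; simp
  · have hk : mf = -(((-mf).toNat : Nat) : Int) := by omega
    have hkpos : 0 < (-mf).toNat := by omega
    rw [hk, PySem.List.slice_to_neg_natCast xs (-mf).toNat hkpos]
    have : xs.length - (-mf).toNat = 0 := by omega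
    rw [this]; simp

theorem pv_go_spec (fp : String) : ∀ (ps : List String) (i : Nat) (buckets : List (List String)),
    pvGoB fp (PySem.Str.lower fp) (PySem.List.enumerate ps (i : Int)) buckets
      = match pvFirstAux fp ps i with
        | none => buckets
        | some j => PySem.List.pySetD buckets (j : Int) (PySem.List.pyGetD buckets (j : Int) [] ++ [fp]) := by
  intro ps
  induction ps with
  | nil => intro i buckets; simp [PySem.List.enumerate, pvGoB, pvFirstAux]
  | cons pat ps ih =>
    intro i buckets
    have he : PySem.List.enumerate (pat :: ps) (i : Int) = ((i : Int), pat) :: PySem.List.enumerate ps ((i : Int) + 1) := rfl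
    rw [he]
    simp only [pvGoB, pvFirstAux, pvMatchA]
    by_cases hm : PySem.Chars.isIn pat.toList (PySem.Chars.lower fp.toList) = true
    · simp [hm]
    · have : ((i : Int) + 1) = ((i + 1 : Nat) : Int) := by push_cast; ring
      simp only [this, ih (i + 1) buckets]
      simp [hm]

theorem pv_bfold : ∀ (ks : List String) (b0 : List (List String)),
    b0.length = pvPatternsA.length →
    ks.foldl (fun buckets fp => pvGoB fp (PySem.Str.lower fp) (PySem.List.enumerate pvPatternsB) buckets) b0
      = (List.range pvPatternsA.length).map (fun i => b0.getD i [] ++ pvGroup ks i) := by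
  intro ks
  induction ks with
  | nil =>
    intro b0 hb
    simp only [List.foldl_nil]
    apply List.ext_getElem
    · simp [hb]
    · intro k h1 h2
      simp [pvGroup, List.getD_eq_getElem?_getD, h1, hb ▸ h1]
  | cons fp ks ih =>
    intro b0 hb
    simp only [List.foldl_cons]
    have hstep : pvGoB fp (PySem.Str.lower fp) (PySem.List.enumerate pvPatternsB) b0
        = match pvFirstAux fp pvPatternsA 0 with
          | none => b0
          | some j => b0.set j (b0.getD j [] ++ [fp]) := by
      have h0 : PySem.List.enumerate pvPatternsB = PySem.List.enumerate pvPatternsA ((0 : Nat) : Int) := rfl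
      rw [h0, pv_go_spec fp pvPatternsA 0 b0]
      cases hf : pvFirstAux fp pvPatternsA 0 with
      | none => rfl
      | some j =>
        have hj : j < pvPatternsA.length := by have := pvFirstAux_bound fp pvPatternsA 0 j hf; omega
        simp [pysem, hb ▸ hj]
    cases hf : pvFirstAux fp pvPatternsA 0 with
    | none =>
      rw [hstep]; simp only [hf]
      rw [ih b0 hb]
      apply List.map_congr_left
      intro k hk
      have : pvGroup (fp :: ks) k = pvGroup ks k := by
        simp only [pvGroup, List.filter_cons]
        rw [if_neg (by simp [hf])]
      rw [this]
    | some j =>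
      rw [hstep]; simp only [hf]
      have hj : j < pvPatternsA.length := by have := pvFirstAux_bound fp pvPatternsA 0 j hf; omega
      rw [ih _ (by simp [hb])]
      apply List.map_congr_left
      intro k hk
      rw [List.mem_range] at hk
      by_cases hkj : k = j
      · subst hkj
        have hset : (b0.set k (b0.getD k [] ++ [fp])).getD k [] = b0.getD k [] ++ [fp] := by
          rw [List.getD_eq_getElem?_getD, List.getElem?_set_self (by omega)]
          rw [List.getD_eq_getElem?_getD]
          simp [List.getElem?_eq_getElem (hb ▸ hj)]
        rw [hset]
        have : pvGroup (fp :: ks) k = fp :: pvGroup ks k := by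
          simp only [pvGroup, List.filter_cons]
          rw [if_pos (by simp [hf])]
        rw [this]
        simp
      · have hset : (b0.set j (b0.getD j [] ++ [fp])).getD k [] = b0.getD k [] := by
          rw [List.getD_eq_getElem?_getD, List.getElem?_set_ne (by omega), ← List.getD_eq_getElem?_getD]
        rw [hset]
        have : pvGroup (fp :: ks) k = pvGroup ks k := by
          simp only [pvGroup, List.filter_cons]
          rw [if_neg (by simp [hf]; omega)]
        rw [this]

-- ===== VERDICT (by name: the statement is the Claim_ definition above) =====
theorem show_key_files_py_spec : Claim_equal_show_key_files_py := by
  intro files mf _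
  unfold Spec_show_key_files_py
  simp only [show_key_files_py, show_key_files_py_alt]
  set d := PySem.Dict.ofList files with hd
  have hks : d.items.map Prod.fst = d.keys := rfl
  by_cases hmf : mf ≤ 0
  · rw [if_pos hmf]
    have hP : pvPatternsA = "main.py" :: pvPatternsA.tail := rfl
    have hkf : pvOuterA mf d.items pvPatternsA [] = pvInnerA "main.py" mf d.items [] := by
      rw [hP]
      simp only [pvOuterA]
      rw [if_pos (by rw [PySem.List.len_eq]; omega)]
    rw [hkf, pv_slice_nonpos hmf (pv_inner_nonpos "main.py" mf hmf d.items)]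
    rfl
  · rw [if_neg hmf]
    have hmf1 : 1 ≤ mf := by omega
    have hnd : (d.items.map Prod.fst).Nodup := by
      rw [hks]; exact PySem.Dict.nodup_keys_ofList files
    have hA := pv_outer_spec mf hmf1 d.items hnd pvPatternsA [] [] rfl rfl
      (by simp only [List.length_nil]; omega)
    rw [hA]
    have hBf := pv_bfold d.keys (List.replicate pvPatternsB.length []) (by simp only [List.length_replicate]; rfl)
    rw [hBf]
    have hflat : ((List.range pvPatternsA.length).map
        (fun i => (List.replicate pvPatternsB.length ([] : List String)).getD i [] ++ pvGroup d.keys i)).flatten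
        = pvG d.keys pvPatternsA.length := by
      have hmap : (List.range pvPatternsA.length).map
          (fun i => (List.replicate pvPatternsB.length ([] : List String)).getD i [] ++ pvGroup d.keys i)
          = (List.range pvPatternsA.length).map (pvGroup d.keys) := by
        apply List.map_congr_left
        intro k _
        simp
      rw [pvG, List.flatMap_def, hmap]
    rw [hflat, ← hks]
    rw [PySem.List.slice_to _ (by omega), PySem.List.slice_to _ (by omega)]
    rw [List.take_take, min_self]
    have hBB : pvBlockB = pvBlockA := rfl
    rw [hBB]
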